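-- pv_equiv track=rewrite | github.com/Cross-bit/group-consensus-eval | evaluation_frameworks/consensus_evaluation/evaluation/evaluation_preparation/eval_dataset_preparation.py | filter_disjoint_groups
-- ===== SOURCE A (Python) =====
-- from typing import Any, DefaultDict, Dict, List, Set, Tuple
--
-- def filter_disjoint_groups(groups: List[List[int]]) -> List[List[int]]:
--     """
--     Greedy filter: keep groups with no user overlap, deduplicate identical groups.
--     - Input order determines which groups are kept.
--     - Works for any group size (not just triplets).
--     """
--     selected: List[List[int]] = []
--     used_users = set()
--     seen_groups = set()  # dedup by membership, regardless of order
--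
--     for g in groups:
--         g_set = frozenset(g)
--         if g_set in seen_groups:
--             continue  # skip exact duplicates (same members)
--         if used_users.isdisjoint(g_set):
--             selected.append(list(g))  # keep original order of members
--             used_users.update(g_set)
--         seen_groups.add(g_set)
--
--     return selected
-- ===== SOURCE B (Python) =====
-- def filter_disjoint_groups(groups):
--     # Pass 1: deduplicate by membership (frozenset), keeping first occurrences.
--     deduped = []
--     seen = set()
--     for g in groups:
--         k = frozenset(g)
--         if k not in seen:
--             seen.add(k)
--             deduped.append(list(g))
--     # Pass 2: greedy selection of user-disjoint groups over the deduped list.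
--     selected = []
--     used = set()
--     for g in deduped:
--         k = frozenset(g)
--         if used.isdisjoint(k):
--             selected.append(g)
--             used.update(k)
--     return selected
-- ===== Notes on version B (the rewrite author's own statement) =====
-- stated objective: alternative
-- what changed: A's single combined pass (dedup + greedy selection with shared state) is split into an explicit dedup-by-membership pass followed by a separate greedy disjoint-selection pass over the deduped list.
import Mathlib
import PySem

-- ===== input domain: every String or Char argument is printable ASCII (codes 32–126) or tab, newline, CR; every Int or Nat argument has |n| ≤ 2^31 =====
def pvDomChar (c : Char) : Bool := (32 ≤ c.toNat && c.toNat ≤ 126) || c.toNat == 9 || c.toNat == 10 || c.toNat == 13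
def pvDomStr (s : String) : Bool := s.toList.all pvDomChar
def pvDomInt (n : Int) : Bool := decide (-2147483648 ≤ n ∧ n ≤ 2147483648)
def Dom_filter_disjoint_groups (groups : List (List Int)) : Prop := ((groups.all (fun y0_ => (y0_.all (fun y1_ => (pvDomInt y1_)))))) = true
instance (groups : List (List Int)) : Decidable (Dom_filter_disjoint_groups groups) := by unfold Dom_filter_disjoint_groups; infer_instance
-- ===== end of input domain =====

-- B splits A's single combined pass into an explicit dedup-by-membership pass
-- followed by a separate greedy disjoint-selection pass (alternative decomposition, same cost).


-- Shared primitives for both ports (Python's frozenset(g), frozenset equality,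
-- set.isdisjoint and set.update, modelled with PySem.Set):
def pvKey (g : List Int) : PySem.Set Int := PySem.Set.ofList g
-- frozenset equality (membership in a Python set of frozensets compares by set equality)
def pvSetEq (a b : PySem.Set Int) : Bool := PySem.Set.equal a b
def pvDisjoint (used : PySem.Set Int) (k : PySem.Set Int) : Bool := PySem.Set.isdisjoint used k
def pvUpd (used : PySem.Set Int) (k : PySem.Set Int) : PySem.Set Int := PySem.Set.update used k

-- ===== PORT A =====
-- A's single loop: state (selected, used_users, seen_groups)
def pvAGo (gs : List (List Int)) (sel : List (List Int)) (used : PySem.Set Int)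
    (seen : List (PySem.Set Int)) : List (List Int) :=
  match gs with
  | [] => sel
  | g :: rest =>
    let k := pvKey g
    if seen.any (pvSetEq k) then pvAGo rest sel used seen
    else if pvDisjoint used k then pvAGo rest (sel ++ [g]) (pvUpd used k) (k :: seen)
    else pvAGo rest sel used (k :: seen)

def filter_disjoint_groups (groups : List (List Int)) : List (List Int) :=
  pvAGo groups [] PySem.Set.empty []

-- ===== PORT B =====
-- B pass 1: dedup by membership, first occurrences
def pvDedup (gs : List (List Int)) (seen : List (PySem.Set Int)) : List (List Int) :=
  match gs with
  | [] => []
  | g :: rest =>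
    let k := pvKey g
    if seen.any (pvSetEq k) then pvDedup rest seen
    else g :: pvDedup rest (k :: seen)

-- B pass 2: greedy selection of disjoint groups
def pvSelect (gs : List (List Int)) (used : PySem.Set Int) : List (List Int) :=
  match gs with
  | [] => []
  | g :: rest =>
    let k := pvKey g
    if pvDisjoint used k then g :: pvSelect rest (pvUpd used k)
    else pvSelect rest used

def filter_disjoint_groups_alt (groups : List (List Int)) : List (List Int) :=
  pvSelect (pvDedup groups []) PySem.Set.empty

-- ===== PRECONDITION & SPEC =====
def Spec_filter_disjoint_groups (groups : List (List Int)) (out : List (List Int)) : Prop := out = filter_disjoint_groups_alt groups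
instance (groups : List (List Int)) (out : List (List Int)) : Decidable (Spec_filter_disjoint_groups groups out) := by unfold Spec_filter_disjoint_groups; infer_instance

-- ===== CLAIM (what is proved, stated in full; the proofs are below) =====
def Claim_equal_filter_disjoint_groups : Prop := ∀ (groups : List (List Int)), Dom_filter_disjoint_groups groups → Spec_filter_disjoint_groups groups (filter_disjoint_groups groups)

-- ===== LEMMAS AND PROOFS =====
-- Fusion invariant: A's combined loop equals the selection pass run over the dedup pass.
theorem pvAGo_eq (gs : List (List Int)) :
    ∀ (sel : List (List Int)) (used : PySem.Set Int) (seen : List (PySem.Set Int)),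
    pvAGo gs sel used seen = sel ++ pvSelect (pvDedup gs seen) used := by
  induction gs with
  | nil => intro sel used seen; simp [pvAGo, pvDedup, pvSelect]
  | cons g rest ih =>
    intro sel used seen
    by_cases hs : seen.any (pvSetEq (pvKey g)) = true
    · simp [pvAGo, pvDedup, hs, ih]
    · by_cases hd : pvDisjoint used (pvKey g) = true
      · simp [pvAGo, pvDedup, pvSelect, hs, hd, ih]
      · simp [pvAGo, pvDedup, pvSelect, hs, hd, ih]

-- ===== VERDICT (by name: the statement is the Claim_ definition above) =====
theorem filter_disjoint_groups_spec : Claim_equal_filter_disjoint_groups := by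
  intro groups _
  show filter_disjoint_groups groups = filter_disjoint_groups_alt groups
  simp [filter_disjoint_groups, filter_disjoint_groups_alt, pvAGo_eq]
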